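-- pv_equiv track=rewrite | github.com/wcho21/boostquest | challenges/generators/4-teared-paper/inputCaseGenerator.py | drawSqauresAndPrimes
-- ===== SOURCE A (Python) =====
-- def drawSqauresAndPrimes(squares, primes, sideLength, indexOrder):
--   linesBuffer = [[] for _ in range(sideLength+2)]
--
--   for i in indexOrder:
--     square = squares[i]
--     prime = primes[i]
--
--     topSide = square[0]
--     rightSide = square[1]
--     bottomSide = square[2]
--     leftSide = square[3]
--
--     primeNumberLineIdx = int((len(leftSide)+2) / 2)
--
--     # draw top sides
--     linesBuffer[0].append(' ')
--     linesBuffer[0].append(topSide)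
--     linesBuffer[0].append(' ')
--
--     # draw left side
--     for j, char in enumerate(list(leftSide[::-1]), 1):
--       linesBuffer[j].append(char)
--       if j != primeNumberLineIdx:
--         linesBuffer[j].append(' ' * len(topSide))
--       else:
--         linesBuffer[j].append(' ' + str(prime).ljust(len(leftSide)-2) + ' ')
--
--     # draw right side
--     for j, char in enumerate(list(rightSide), 1):
--       linesBuffer[j].append(char)
--
--     # draw bottom sides
--     linesBuffer[-1].append(' ')
--     linesBuffer[-1].append(bottomSide[::-1])
--     linesBuffer[-1].append(' ')
--
--     # draw margin
--     for j in range(len(leftSide)+2):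
--       linesBuffer[j].append(' ')
--
--   lines = '\n'.join(map(lambda line: ''.join(line), linesBuffer))
--   return lines
-- ===== SOURCE B (Python) =====
-- def drawSqauresAndPrimes(squares, primes, sideLength, indexOrder):
--   height = sideLength + 2
--
--   def renderBlock(square, prime):
--     top, right, bottom, left = square[0], square[1], square[2], square[3]
--     revLeft = left[::-1]
--     primeRow = (len(left) + 2) // 2
--     rows = []
--     for j in range(height):
--       parts = []
--       if j == 0:
--         parts.append(' ' + top + ' ')
--       if 1 <= j <= len(left):
--         parts.append(revLeft[j-1])
--         if j == primeRow:
--           parts.append(' ' + str(prime).ljust(len(left)-2) + ' ')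
--         else:
--           parts.append(' ' * len(top))
--       if 1 <= j <= len(right):
--         parts.append(right[j-1])
--       if j == height - 1:
--         parts.append(' ' + bottom[::-1] + ' ')
--       if j <= len(left) + 1:
--         parts.append(' ')
--       rows.append(''.join(parts))
--     return rows
--
--   blocks = [renderBlock(squares[i], primes[i]) for i in indexOrder]
--   return '\n'.join(''.join(b[r] for b in blocks) for r in range(height))
-- ===== Notes on version B (the rewrite author's own statement) =====
-- stated objective: alternative
-- what changed: A interleaves every square's pieces into a shared per-line buffer indexed by row; B renders each square into its own block of row-strings and then stitches the blocks together row by row, so the output is built per-square instead of per-buffer-write.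
import Mathlib
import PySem

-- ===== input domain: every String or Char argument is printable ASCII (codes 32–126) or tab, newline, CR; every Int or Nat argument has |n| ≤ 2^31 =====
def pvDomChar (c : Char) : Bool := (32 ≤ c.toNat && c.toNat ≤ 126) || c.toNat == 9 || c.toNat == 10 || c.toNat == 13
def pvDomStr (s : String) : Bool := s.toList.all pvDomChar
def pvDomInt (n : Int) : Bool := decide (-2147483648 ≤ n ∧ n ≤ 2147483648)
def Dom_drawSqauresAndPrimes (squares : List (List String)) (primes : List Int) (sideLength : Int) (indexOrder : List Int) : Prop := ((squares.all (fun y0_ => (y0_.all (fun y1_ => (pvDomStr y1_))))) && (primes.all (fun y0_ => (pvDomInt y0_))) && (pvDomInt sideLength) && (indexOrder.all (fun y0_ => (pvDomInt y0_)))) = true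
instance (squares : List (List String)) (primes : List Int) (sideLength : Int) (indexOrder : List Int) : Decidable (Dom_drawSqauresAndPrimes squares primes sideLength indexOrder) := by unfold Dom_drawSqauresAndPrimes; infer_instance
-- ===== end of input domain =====

-- B renders each square into its own block of rows and stitches the blocks side by side,
-- instead of A's interleaved appends into one shared per-line buffer (objective: alternative decomposition).

-- s.ljust(w): pad on the right with spaces to width w (no padding if w ≤ len(s)); exact
def pvLjust (cs : List Char) (w : Int) : List Char :=
  cs ++ List.replicate (w - (cs.length : Int)).toNat ' '

-- ===== PORT A =====
-- linesBuffer[j].append(s) with Python's negative-index rule; an out-of-range j is an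
-- IndexError in Python (excluded by Pre_) and leaves the buffer unchanged here.
def pvApp (buf : List (List Char)) (j : Int) (s : List Char) : List (List Char) :=
  let k : Int := if j < 0 then (buf.length : Int) + j else j
  if 0 ≤ k ∧ k < (buf.length : Int) then buf.set k.toNat (buf.getD k.toNat [] ++ s) else buf

-- for j, char in enumerate(list(leftSide[::-1]), 1): append char, then the middle filler
def pvLeftLoop (buf : List (List Char)) (chars : List Char) (j mid : Int)
    (topLen : Nat) (primeStr : List Char) (leftLen : Nat) : List (List Char) :=
  match chars with
  | [] => buf
  | c :: rest =>
    let buf := pvApp buf j [c]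
    let buf := if j ≠ mid then pvApp buf j (List.replicate topLen ' ')
               else pvApp buf j ([' '] ++ pvLjust primeStr ((leftLen : Int) - 2) ++ [' '])
    pvLeftLoop buf rest (j + 1) mid topLen primeStr leftLen

-- for j, char in enumerate(list(rightSide), 1): append char
def pvRightLoop (buf : List (List Char)) (chars : List Char) (j : Int) : List (List Char) :=
  match chars with
  | [] => buf
  | c :: rest => pvRightLoop (pvApp buf j [c]) rest (j + 1)

-- one iteration of A's main loop (the body for one i)
def pvDrawOne (squares : List (List String)) (primes : List Int)
    (buf : List (List Char)) (i : Int) : List (List Char) :=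
  let square := PySem.List.pyGetD squares i []
  let prime  := PySem.List.pyGetD primes i 0
  let top    := (PySem.List.pyGetD square 0 "").toList
  let right  := (PySem.List.pyGetD square 1 "").toList
  let bottom := (PySem.List.pyGetD square 2 "").toList
  let left   := (PySem.List.pyGetD square 3 "").toList
  -- int((len(leftSide)+2) / 2): exact as floor division on these magnitudes
  let mid    := PySem.Int.floordiv ((left.length : Int) + 2) 2
  let buf := pvApp buf 0 [' ']
  let buf := pvApp buf 0 top
  let buf := pvApp buf 0 [' ']
  -- leftSide[::-1] is reversal (PySem.List.slice?_none_none_neg_one)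
  let buf := pvLeftLoop buf left.reverse 1 mid top.length (PySem.Int.toChars prime) left.length
  let buf := pvRightLoop buf right 1
  let buf := pvApp buf (-1) [' ']
  let buf := pvApp buf (-1) bottom.reverse
  let buf := pvApp buf (-1) [' ']
  (PySem.List.pyRange 0 ((left.length : Int) + 2) 1).foldl (fun b j => pvApp b j [' ']) buf

def drawSqauresAndPrimes (squares : List (List String)) (primes : List Int) (sideLength : Int) (indexOrder : List Int) : String :=
  let linesBuffer : List (List Char) := List.replicate (sideLength + 2).toNat []
  let final := indexOrder.foldl (pvDrawOne squares primes) linesBuffer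
  String.ofList (PySem.Chars.join ['\n'] final)

-- ===== PORT B =====
-- row r of the block rendered for one square (''.join(parts) = concatenation of the parts)
def pvBlockRow (prime height : Int) (top right bottom left : List Char) (r : Nat) : List Char :=
  let revLeft := left.reverse
  let primeRow := PySem.Int.floordiv ((left.length : Int) + 2) 2
  (if r = 0 then [' '] ++ top ++ [' '] else [])
  ++ (if 1 ≤ r ∧ r ≤ left.length then
        [revLeft.getD (r - 1) ' ']
        ++ (if (r : Int) = primeRow then [' '] ++ pvLjust (PySem.Int.toChars prime) ((left.length : Int) - 2) ++ [' ']
            else List.replicate top.length ' ')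
      else [])
  ++ (if 1 ≤ r ∧ r ≤ right.length then [right.getD (r - 1) ' '] else [])
  ++ (if (r : Int) = height - 1 then [' '] ++ bottom.reverse ++ [' '] else [])
  ++ (if (r : Int) ≤ (left.length : Int) + 1 then [' '] else [])

def pvRenderBlock (square : List String) (prime height : Int) : List (List Char) :=
  (List.range height.toNat).map
    (pvBlockRow prime height
      (PySem.List.pyGetD square 0 "").toList (PySem.List.pyGetD square 1 "").toList
      (PySem.List.pyGetD square 2 "").toList (PySem.List.pyGetD square 3 "").toList)

def drawSqauresAndPrimes_alt (squares : List (List String)) (primes : List Int) (sideLength : Int) (indexOrder : List Int) : String :=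
  let height := sideLength + 2
  let blocks := indexOrder.map (fun i =>
    pvRenderBlock (PySem.List.pyGetD squares i []) (PySem.List.pyGetD primes i 0) height)
  let rows := (List.range height.toNat).map (fun r => (blocks.map (fun b => b.getD r [])).flatten)
  String.ofList (PySem.Chars.join ['\n'] rows)

-- ===== PRECONDITION & SPEC =====
-- Pre_ excludes exactly the inputs on which A raises IndexError: an index of indexOrder out of
-- range for squares or primes, a square with fewer than 4 sides, or a square whose left/right
-- side is too long for the sideLength+2 line buffer.
def Pre_drawSqauresAndPrimes (squares : List (List String)) (primes : List Int) (sideLength : Int) (indexOrder : List Int) : Prop :=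
  ∀ i ∈ indexOrder,
    PySem.Raise.InRange squares.length i ∧ PySem.Raise.InRange primes.length i ∧
    4 ≤ (PySem.List.pyGetD squares i []).length ∧
    ((PySem.Str.len (PySem.List.pyGetD (PySem.List.pyGetD squares i []) 3 "") : Int) ≤ sideLength) ∧
    ((PySem.Str.len (PySem.List.pyGetD (PySem.List.pyGetD squares i []) 1 "") : Int) ≤ sideLength + 1)
instance (squares : List (List String)) (primes : List Int) (sideLength : Int) (indexOrder : List Int) : Decidable (Pre_drawSqauresAndPrimes squares primes sideLength indexOrder) := by unfold Pre_drawSqauresAndPrimes; infer_instance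

def pvWitness_drawSqauresAndPrimes : List (List String) × List Int × Int × List Int :=
  ([["-", "|", "-", "|"]], [2], 1, [0])

def Spec_drawSqauresAndPrimes (squares : List (List String)) (primes : List Int) (sideLength : Int) (indexOrder : List Int) (out : String) : Prop := out = drawSqauresAndPrimes_alt squares primes sideLength indexOrder
instance (squares : List (List String)) (primes : List Int) (sideLength : Int) (indexOrder : List Int) (out : String) : Decidable (Spec_drawSqauresAndPrimes squares primes sideLength indexOrder out) := by unfold Spec_drawSqauresAndPrimes; infer_instance

-- ===== CLAIM (what is proved, stated in full; the proofs are below) =====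
def Claim_equal_drawSqauresAndPrimes : Prop := ∀ (squares : List (List String)) (primes : List Int) (sideLength : Int) (indexOrder : List Int), Dom_drawSqauresAndPrimes squares primes sideLength indexOrder → Pre_drawSqauresAndPrimes squares primes sideLength indexOrder → Spec_drawSqauresAndPrimes squares primes sideLength indexOrder (drawSqauresAndPrimes squares primes sideLength indexOrder)

-- ===== LEMMAS AND PROOFS =====

theorem pvApp_length (buf : List (List Char)) (j : Int) (s : List Char) :
    (pvApp buf j s).length = buf.length := by
  unfold pvApp; dsimp only; split <;> split <;> simp

theorem pvApp_getD (buf : List (List Char)) (j : Int) (s : List Char) (r : Nat) :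
    (pvApp buf j s).getD r [] =
      if (if j < 0 then (buf.length : Int) + j else j) = (r : Int) ∧ r < buf.length
      then buf.getD r [] ++ s else buf.getD r [] := by
  unfold pvApp
  dsimp only
  set k : Int := if j < 0 then (buf.length : Int) + j else j with hk
  by_cases h1 : 0 ≤ k ∧ k < (buf.length : Int)
  · rw [if_pos h1]
    by_cases h2 : k = (r : Int) ∧ r < buf.length
    · have hkr : k.toNat = r := by omega
      rw [if_pos h2, hkr]
      simp [List.getD_eq_getElem?_getD, h2.2]
    · have hne : k.toNat ≠ r ∨ ¬ r < buf.length := by omega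
      rw [if_neg h2]
      rcases hne with hne | hne
      · simp [List.getD_eq_getElem?_getD, List.getElem?_set_ne hne]
      · have hge : buf.length ≤ r := Nat.le_of_not_lt hne
        have e1 : (buf.set k.toNat (buf.getD k.toNat [] ++ s)).getD r [] = [] := by
          simp [List.getD_eq_getElem?_getD, hge]
        have e2 : buf.getD r [] = [] := by
          simp [List.getD_eq_getElem?_getD, hge]
        rw [e1, e2]
  · have h2 : ¬ (k = (r : Int) ∧ r < buf.length) := by omega
    rw [if_neg h1, if_neg h2]

theorem pvApp_getD_nat (buf : List (List Char)) (j : Nat) (s : List Char)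
    (hj : j < buf.length) (r : Nat) :
    (pvApp buf (j : Int) s).getD r [] =
      if r = j then buf.getD r [] ++ s else buf.getD r [] := by
  rw [pvApp_getD]
  by_cases hr : r = j
  · subst hr
    rw [if_pos ⟨by split <;> omega, hj⟩, if_pos rfl]
  · rw [if_neg hr, if_neg (by split <;> omega)]

theorem pvApp_getD_neg_one (buf : List (List Char)) (s : List Char)
    (h : 1 ≤ buf.length) (r : Nat) :
    (pvApp buf (-1) s).getD r [] =
      if r = buf.length - 1 then buf.getD r [] ++ s else buf.getD r [] := by
  rw [pvApp_getD]
  by_cases hr : r = buf.length - 1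
  · rw [if_pos hr, if_pos ⟨by split <;> omega, by omega⟩]
  · rw [if_neg hr, if_neg (by split <;> omega)]

theorem pvApp_getD_zero (buf : List (List Char)) (s : List Char)
    (h : 0 < buf.length) (r : Nat) :
    (pvApp buf 0 s).getD r [] = if r = 0 then buf.getD r [] ++ s else buf.getD r [] := by
  have := pvApp_getD_nat buf 0 s h r
  simpa using this

theorem pvLeftLoop_length (chars : List Char) : ∀ (buf : List (List Char)) (j mid : Int)
    (topLen : Nat) (ps : List Char) (ll : Nat),
    (pvLeftLoop buf chars j mid topLen ps ll).length = buf.length := by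
  induction chars with
  | nil => intro buf j mid tl ps ll; rfl
  | cons c rest ih =>
    intro buf j mid tl ps ll
    unfold pvLeftLoop
    dsimp only
    rw [ih]
    split <;> rw [pvApp_length, pvApp_length]

theorem pvLeftLoop_getD (mid : Int) (tl : Nat) (ps : List Char) (ll : Nat) :
    ∀ (chars : List Char) (buf : List (List Char)) (j0 : Nat), 1 ≤ j0 →
    j0 + chars.length ≤ buf.length → ∀ (r : Nat),
    (pvLeftLoop buf chars (j0 : Int) mid tl ps ll).getD r [] =
      buf.getD r [] ++ (if j0 ≤ r ∧ r < j0 + chars.length then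
        chars.getD (r - j0) ' ' ::
          (if (r : Int) = mid then [' '] ++ pvLjust ps ((ll : Int) - 2) ++ [' ']
           else List.replicate tl ' ')
        else []) := by
  intro chars
  induction chars with
  | nil =>
    intro buf j0 hj hle r
    simp [pvLeftLoop]
  | cons c rest ih =>
    intro buf j0 hj hle r
    have hjlen : j0 < buf.length := by simp at hle; omega
    unfold pvLeftLoop
    dsimp only
    set buf1 := pvApp buf (j0 : Int) [c] with hbuf1
    set buf2 := (if (j0 : Int) ≠ mid then pvApp buf1 (j0 : Int) (List.replicate tl ' ')
                 else pvApp buf1 (j0 : Int) ([' '] ++ pvLjust ps ((ll : Int) - 2) ++ [' '])) with hbuf2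
    have hlen1 : buf1.length = buf.length := pvApp_length _ _ _
    have hlen2 : buf2.length = buf.length := by
      rw [hbuf2]; split <;> rw [pvApp_length, hlen1]
    have hcast : (j0 : Int) + 1 = ((j0 + 1 : Nat) : Int) := by push_cast; ring
    rw [hcast, ih buf2 (j0 + 1) (by omega) (by simp at hle ⊢; omega) r]
    have hb1 : buf1.getD r [] = if r = j0 then buf.getD r [] ++ [c] else buf.getD r [] :=
      pvApp_getD_nat buf j0 [c] hjlen r
    have hb2 : buf2.getD r [] = buf.getD r [] ++
        (if r = j0 then c :: (if (r : Int) = mid then [' '] ++ pvLjust ps ((ll : Int) - 2) ++ [' ']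
                              else List.replicate tl ' ') else []) := by
      rw [hbuf2,
          show (if (j0 : Int) ≠ mid then pvApp buf1 (j0 : Int) (List.replicate tl ' ')
                else pvApp buf1 (j0 : Int) ([' '] ++ pvLjust ps ((ll : Int) - 2) ++ [' ']))
            = pvApp buf1 (j0 : Int) (if (j0 : Int) ≠ mid then List.replicate tl ' '
                else [' '] ++ pvLjust ps ((ll : Int) - 2) ++ [' ']) from by split <;> rfl,
          pvApp_getD_nat buf1 j0 _ (by omega) r, hb1]
      by_cases hr : r = j0
      · rw [hr]
        rw [if_pos rfl, if_pos rfl, if_pos rfl]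
        by_cases hm : ((j0 : Nat) : Int) = mid
        · simp [hm]
        · simp [hm]
      · rw [if_neg hr, if_neg hr, if_neg hr]
        simp
    rw [hb2]
    by_cases hr : r = j0
    · have h1 : ¬ (j0 + 1 ≤ r ∧ r < j0 + 1 + rest.length) := by omega
      have h2 : j0 ≤ r ∧ r < j0 + (c :: rest).length := by simp; omega
      rw [if_neg h1, if_pos h2]
      simp [hr]
    · by_cases h1 : j0 + 1 ≤ r ∧ r < j0 + 1 + rest.length
      · have h2 : j0 ≤ r ∧ r < j0 + (c :: rest).length := by simp; omega
        have hget : rest.getD (r - (j0 + 1)) ' ' = (c :: rest).getD (r - j0) ' ' := by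
          have : r - j0 = (r - (j0 + 1)) + 1 := by omega
          simp [this]
        rw [if_pos h1, if_pos h2, hget]
        simp [hr]
      · have h2 : ¬ (j0 ≤ r ∧ r < j0 + (c :: rest).length) := by simp; omega
        rw [if_neg hr, if_neg h1, if_neg h2]
        simp

theorem pvRightLoop_length (chars : List Char) : ∀ (buf : List (List Char)) (j : Int),
    (pvRightLoop buf chars j).length = buf.length := by
  induction chars with
  | nil => intro buf j; rfl
  | cons c rest ih => intro buf j; unfold pvRightLoop; rw [ih]; exact pvApp_length _ _ _

theorem pvRightLoop_getD :
    ∀ (chars : List Char) (buf : List (List Char)) (j0 : Nat), 1 ≤ j0 →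
    j0 + chars.length ≤ buf.length → ∀ (r : Nat),
    (pvRightLoop buf chars (j0 : Int)).getD r [] =
      buf.getD r [] ++ (if j0 ≤ r ∧ r < j0 + chars.length then [chars.getD (r - j0) ' '] else []) := by
  intro chars
  induction chars with
  | nil => intro buf j0 hj hle r; simp [pvRightLoop]
  | cons c rest ih =>
    intro buf j0 hj hle r
    have hjlen : j0 < buf.length := by simp at hle; omega
    unfold pvRightLoop
    have hcast : (j0 : Int) + 1 = ((j0 + 1 : Nat) : Int) := by push_cast; ring
    rw [hcast, ih _ (j0 + 1) (by omega) (by rw [pvApp_length]; simp at hle ⊢; omega) r]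
    rw [pvApp_getD_nat buf j0 [c] hjlen r]
    by_cases hr : r = j0
    · have h1 : ¬ (j0 + 1 ≤ r ∧ r < j0 + 1 + rest.length) := by omega
      have h2 : j0 ≤ r ∧ r < j0 + (c :: rest).length := by simp; omega
      rw [if_neg h1, if_pos h2]
      simp [hr]
    · by_cases h1 : j0 + 1 ≤ r ∧ r < j0 + 1 + rest.length
      · have h2 : j0 ≤ r ∧ r < j0 + (c :: rest).length := by simp; omega
        have hget : rest.getD (r - (j0 + 1)) ' ' = (c :: rest).getD (r - j0) ' ' := by
          have : r - j0 = (r - (j0 + 1)) + 1 := by omega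
          simp [this]
        rw [if_pos h1, if_pos h2, hget]
        simp [hr]
      · have h2 : ¬ (j0 ≤ r ∧ r < j0 + (c :: rest).length) := by simp; omega
        rw [if_neg hr, if_neg h1, if_neg h2]

theorem pvMargin_length (js : List Int) : ∀ (buf : List (List Char)),
    (js.foldl (fun b j => pvApp b j [' ']) buf).length = buf.length := by
  induction js with
  | nil => intro buf; rfl
  | cons j rest ih => intro buf; simp only [List.foldl_cons]; rw [ih, pvApp_length]

theorem pvMargin_getD (n : Nat) : ∀ (buf : List (List Char)), n ≤ buf.length → ∀ (r : Nat),
    ((PySem.List.pyRange 0 (n : Int) 1).foldl (fun b j => pvApp b j [' ']) buf).getD r [] =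
      buf.getD r [] ++ (if r < n then [' '] else []) := by
  induction n with
  | zero => intro buf _ r; simp [PySem.List.pyRange_one_eq_nil]
  | succ m ih =>
    intro buf hle r
    have hcast : ((m + 1 : Nat) : Int) = (m : Int) + 1 := by push_cast; ring
    rw [hcast, PySem.List.pyRange_one_succ_right (by positivity), List.foldl_append]
    simp only [List.foldl_cons, List.foldl_nil]
    rw [pvApp_getD_nat _ m [' '] (by rw [pvMargin_length]; omega) r, ih buf (by omega) r]
    by_cases hr : r = m
    · rw [if_pos hr, if_neg (by omega : ¬ r < m), if_pos (by omega : r < m + 1)]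
      simp
    · rw [if_neg hr]
      by_cases h1 : r < m
      · rw [if_pos h1, if_pos (by omega : r < m + 1)]
      · rw [if_neg h1, if_neg (by omega : ¬ r < m + 1)]

theorem pvDrawOne_length (squares : List (List String)) (primes : List Int)
    (buf : List (List Char)) (i : Int) :
    (pvDrawOne squares primes buf i).length = buf.length := by
  unfold pvDrawOne
  dsimp only
  rw [pvMargin_length, pvApp_length, pvApp_length, pvApp_length, pvRightLoop_length,
      pvLeftLoop_length, pvApp_length, pvApp_length, pvApp_length]

theorem pvDrawOne_getD (squares : List (List String)) (primes : List Int)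
    (buf : List (List Char)) (i : Int)
    (hleft : (PySem.List.pyGetD (PySem.List.pyGetD squares i []) 3 "").toList.length + 2 ≤ buf.length)
    (hright : (PySem.List.pyGetD (PySem.List.pyGetD squares i []) 1 "").toList.length + 1 ≤ buf.length)
    (r : Nat) :
    (pvDrawOne squares primes buf i).getD r [] =
      buf.getD r [] ++ pvBlockRow (PySem.List.pyGetD primes i 0) (buf.length : Int)
        (PySem.List.pyGetD (PySem.List.pyGetD squares i []) 0 "").toList
        (PySem.List.pyGetD (PySem.List.pyGetD squares i []) 1 "").toList
        (PySem.List.pyGetD (PySem.List.pyGetD squares i []) 2 "").toList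
        (PySem.List.pyGetD (PySem.List.pyGetD squares i []) 3 "").toList r := by
  unfold pvDrawOne
  dsimp only
  set sq := PySem.List.pyGetD squares i [] with hsq
  set top := (PySem.List.pyGetD sq 0 "").toList with htop
  set right := (PySem.List.pyGetD sq 1 "").toList with hright'
  set bottom := (PySem.List.pyGetD sq 2 "").toList with hbot
  set left := (PySem.List.pyGetD sq 3 "").toList with hleft'
  have hH : 2 ≤ buf.length := by omega
  -- the three top appends
  set buf1 := pvApp (pvApp (pvApp buf 0 [' ']) 0 top) 0 [' '] with hbuf1
  have hlen1 : buf1.length = buf.length := by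
    rw [hbuf1, pvApp_length, pvApp_length, pvApp_length]
  have hb1 : ∀ r : Nat, buf1.getD r [] = buf.getD r [] ++ (if r = 0 then [' '] ++ top ++ [' '] else []) := by
    intro r
    rw [hbuf1,
        pvApp_getD_zero _ [' '] (by rw [pvApp_length, pvApp_length]; omega) r,
        pvApp_getD_zero _ top (by rw [pvApp_length]; omega) r,
        pvApp_getD_zero buf [' '] (by omega) r]
    by_cases hr : r = 0
    · simp [hr]
    · simp [hr]
  -- left loop
  have hcast1 : (1 : Int) = ((1 : Nat) : Int) := by norm_num
  set mid := PySem.Int.floordiv ((left.length : Int) + 2) 2 with hmid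
  set buf2 := pvLeftLoop buf1 left.reverse 1 mid top.length (PySem.Int.toChars (PySem.List.pyGetD primes i 0)) left.length with hbuf2
  have hlen2 : buf2.length = buf.length := by rw [hbuf2, pvLeftLoop_length, hlen1]
  have hb2 : ∀ r : Nat, buf2.getD r [] = buf1.getD r [] ++
      (if 1 ≤ r ∧ r < 1 + left.length then
        left.reverse.getD (r - 1) ' ' ::
          (if (r : Int) = mid then [' '] ++ pvLjust (PySem.Int.toChars (PySem.List.pyGetD primes i 0)) ((left.length : Int) - 2) ++ [' ']
           else List.replicate top.length ' ')
        else []) := by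
    intro r
    rw [hbuf2, hcast1, pvLeftLoop_getD mid top.length _ left.length left.reverse buf1 1 (by omega)
        (by rw [hlen1]; simp; omega) r, List.length_reverse]
  -- right loop
  set buf3 := pvRightLoop buf2 right 1 with hbuf3
  have hlen3 : buf3.length = buf.length := by rw [hbuf3, pvRightLoop_length, hlen2]
  have hb3 : ∀ r : Nat, buf3.getD r [] = buf2.getD r [] ++
      (if 1 ≤ r ∧ r < 1 + right.length then [right.getD (r - 1) ' '] else []) := by
    intro r
    rw [hbuf3, hcast1, pvRightLoop_getD right buf2 1 (by omega) (by rw [hlen2]; omega) r]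
  -- the three bottom appends at -1
  set buf4 := pvApp (pvApp (pvApp buf3 (-1) [' ']) (-1) bottom.reverse) (-1) [' '] with hbuf4
  have hlen4 : buf4.length = buf.length := by
    rw [hbuf4, pvApp_length, pvApp_length, pvApp_length, hlen3]
  have hb4 : ∀ r : Nat, buf4.getD r [] = buf3.getD r [] ++
      (if r = buf.length - 1 then [' '] ++ bottom.reverse ++ [' '] else []) := by
    intro r
    rw [hbuf4,
        pvApp_getD_neg_one _ [' '] (by rw [pvApp_length, pvApp_length, hlen3]; omega) r,
        pvApp_getD_neg_one _ bottom.reverse (by rw [pvApp_length, hlen3]; omega) r,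
        pvApp_getD_neg_one buf3 [' '] (by rw [hlen3]; omega) r]
    simp only [pvApp_length, hlen3]
    by_cases hr : r = buf.length - 1
    · simp [hr]
    · simp [hr]
  -- margin
  have hcast2 : ((left.length : Int) + 2) = ((left.length + 2 : Nat) : Int) := by push_cast; ring
  rw [hcast2, pvMargin_getD (left.length + 2) buf4 (by omega) r]
  rw [hb4, hb3, hb2, hb1]
  unfold pvBlockRow
  dsimp only
  rw [← hmid]
  simp only [show (1 ≤ r ∧ r < 1 + left.length) ↔ (1 ≤ r ∧ r ≤ left.length) from by omega,
             show (1 ≤ r ∧ r < 1 + right.length) ↔ (1 ≤ r ∧ r ≤ right.length) from by omega,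
             show (r = buf.length - 1) ↔ ((r : Int) = (buf.length : Int) - 1) from by omega,
             show (r < left.length + 2) ↔ ((r : Int) ≤ (left.length : Int) + 1) from by omega,
             List.append_assoc, List.singleton_append]

theorem pvFold_length (squares : List (List String)) (primes : List Int) :
    ∀ (L : List Int) (buf : List (List Char)),
    (L.foldl (pvDrawOne squares primes) buf).length = buf.length := by
  intro L
  induction L with
  | nil => intro buf; rfl
  | cons i rest ih => intro buf; simp only [List.foldl_cons]; rw [ih, pvDrawOne_length]

theorem pvFold_getD (squares : List (List String)) (primes : List Int) (sideLength : Int) :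
    ∀ (L : List Int) (buf : List (List Char)),
    (buf.length : Int) = sideLength + 2 →
    (∀ i ∈ L,
      ((PySem.List.pyGetD (PySem.List.pyGetD squares i []) 3 "").toList.length : Int) ≤ sideLength ∧
      ((PySem.List.pyGetD (PySem.List.pyGetD squares i []) 1 "").toList.length : Int) ≤ sideLength + 1) →
    ∀ (r : Nat),
    (L.foldl (pvDrawOne squares primes) buf).getD r [] =
      buf.getD r [] ++
        (L.map (fun i => pvBlockRow (PySem.List.pyGetD primes i 0) (sideLength + 2)
          (PySem.List.pyGetD (PySem.List.pyGetD squares i []) 0 "").toList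
          (PySem.List.pyGetD (PySem.List.pyGetD squares i []) 1 "").toList
          (PySem.List.pyGetD (PySem.List.pyGetD squares i []) 2 "").toList
          (PySem.List.pyGetD (PySem.List.pyGetD squares i []) 3 "").toList r)).flatten := by
  intro L
  induction L with
  | nil => intro buf _ _ r; simp
  | cons i rest ih =>
    intro buf hlen hpre r
    obtain ⟨h3, h1⟩ := hpre i (by simp)
    simp only [List.foldl_cons]
    rw [ih (pvDrawOne squares primes buf i)
        (by rw [pvDrawOne_length]; exact hlen)
        (fun j hj => hpre j (by simp [hj])) r]
    rw [pvDrawOne_getD squares primes buf i (by omega) (by omega) r]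
    have hH : (buf.length : Int) = sideLength + 2 := hlen
    rw [hH]
    simp [List.append_assoc]

theorem pvGetD_map_range {α : Type} (f : Nat → α) (n r : Nat) (d : α) (h : r < n) :
    ((List.range n).map f).getD r d = f r := by
  rw [List.getD_eq_getElem?_getD]
  simp [List.getElem?_map, List.getElem?_range h]

-- ===== VERDICT (by name: the statement is the Claim_ definition above) =====
theorem drawSqauresAndPrimes_spec : Claim_equal_drawSqauresAndPrimes := by
  intro squares primes sideLength indexOrder _ hpre
  unfold Spec_drawSqauresAndPrimes drawSqauresAndPrimes drawSqauresAndPrimes_alt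
  dsimp only
  congr 1
  congr 1
  set H := (sideLength + 2).toNat with hHdef
  have hpre' : ∀ i ∈ indexOrder,
      ((PySem.List.pyGetD (PySem.List.pyGetD squares i []) 3 "").toList.length : Int) ≤ sideLength ∧
      ((PySem.List.pyGetD (PySem.List.pyGetD squares i []) 1 "").toList.length : Int) ≤ sideLength + 1 := by
    intro i hi
    obtain ⟨_, _, _, h3, h1⟩ := hpre i hi
    constructor
    · simpa [PySem.Str.len_eq] using h3
    · simpa [PySem.Str.len_eq] using h1
  by_cases hne : indexOrder = []
  · subst hne
    simp [List.foldl_nil]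
  · -- indexOrder nonempty: sideLength ≥ 0, so (H : Int) = sideLength + 2
    obtain ⟨i0, hi0⟩ := List.exists_mem_of_ne_nil indexOrder hne
    have hs : 0 ≤ sideLength := by
      have := (hpre' i0 hi0).1
      have : (0 : Int) ≤ (PySem.List.pyGetD (PySem.List.pyGetD squares i0 []) 3 "").toList.length := by positivity
      omega
    have hHint : (H : Int) = sideLength + 2 := by rw [hHdef]; omega
    have hinit : (List.replicate H ([] : List Char)).length = H := by simp
    apply List.ext_getElem
    · rw [pvFold_length]; simp
    · intro r hr1 hr2
      have hrH : r < H := by simpa using hr2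
      have hfoldlen : (indexOrder.foldl (pvDrawOne squares primes) (List.replicate H [])).length = H := by
        rw [pvFold_length]; simp
      rw [← List.getD_eq_getElem _ [] , ← List.getD_eq_getElem _ []]
      rw [pvFold_getD squares primes sideLength indexOrder (List.replicate H [])
          (by rw [hinit]; exact hHint) hpre' r]
      rw [pvGetD_map_range _ H r [] hrH]
      have hinitr : (List.replicate H ([] : List Char)).getD r [] = [] := by
        simp [List.getD_eq_getElem?_getD]
      rw [hinitr, List.nil_append]
      rw [List.map_map]
      congr 1
      apply List.map_congr_left
      intro i hi
      unfold pvRenderBlock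
      rw [Function.comp_apply, pvGetD_map_range _ (sideLength + 2).toNat r _ hrH]
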